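-- pv_equiv track=rewrite | github.com/ironman5366/brain | viz/reconstruction.py | get_default_epoch
-- ===== SOURCE A (Python) =====
-- def get_default_epoch(epochs: list[str]) -> int:
--     """Get the default epoch index. Prefer 'final', otherwise highest epoch number."""
--     if "final" in epochs:
--         return epochs.index("final")
--
--     # Try to find highest epoch number
--     epoch_nums = []
--     for i, ep in enumerate(epochs):
--         if ep.startswith("epoch_"):
--             try:
--                 num = int(ep.split("_")[1])
--                 epoch_nums.append((num, i))
--             except (ValueError, IndexError):
--                 pass
--
--     if epoch_nums:
--         # Return index of highest epoch number
--         return max(epoch_nums, key=lambda x: x[0])[1]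
--
--     return 0  # Default to first
-- ===== SOURCE B (Python) =====
-- def _epoch_num(ep):
--     """Parse the epoch number from 'epoch_<n>', or None (same guarded parse as the spec)."""
--     if ep.startswith("epoch_"):
--         try:
--             return int(ep.split("_")[1])
--         except (ValueError, IndexError):
--             return None
--     return None
--
--
-- def get_default_epoch(epochs: list[str]) -> int:
--     """Get the default epoch index. Prefer 'final', otherwise highest epoch number."""
--     final_index = -1
--     best = None  # (num, index) of the first highest-numbered epoch seen so far
--     for i, ep in enumerate(epochs):
--         if final_index < 0 and ep == "final":
--             final_index = i
--         num = _epoch_num(ep)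
--         if num is not None and (best is None or best[0] < num):
--             best = (num, i)
--     if final_index >= 0:
--         return final_index
--     return best[1] if best is not None else 0
-- ===== Notes on version B (the rewrite author's own statement) =====
-- stated objective: simpler
-- what changed: A scans the list up to three times ('final' in epochs, .index, then building an epoch-number list and taking max with a key); B makes one fused pass over enumerate(epochs) tracking final_index and the first highest (num, index), with strict-greater updates preserving max's first-max tie behaviour.
import Mathlib
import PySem

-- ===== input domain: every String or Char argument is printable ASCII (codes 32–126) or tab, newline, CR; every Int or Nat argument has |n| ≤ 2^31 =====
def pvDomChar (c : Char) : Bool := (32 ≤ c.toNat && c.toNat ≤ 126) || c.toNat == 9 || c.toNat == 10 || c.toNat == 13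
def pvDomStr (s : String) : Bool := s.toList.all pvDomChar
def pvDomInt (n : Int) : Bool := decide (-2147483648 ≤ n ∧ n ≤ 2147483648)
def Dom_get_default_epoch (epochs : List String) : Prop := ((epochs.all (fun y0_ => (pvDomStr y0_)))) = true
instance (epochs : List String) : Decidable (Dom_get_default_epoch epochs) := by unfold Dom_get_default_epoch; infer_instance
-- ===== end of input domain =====

-- B replaces A's 'final'-membership scan + appended (num,index) list + max(key) pass by one
-- fused pass over enumerate(epochs) tracking final_index and the first highest (num,index); objective: simpler.

-- the guarded parse 'int(ep.split("_")[1])' under 'if ep.startswith("epoch_")', shared verbatim by both sources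
def pvEpochNum? (ep : String) : Option Int :=
  if PySem.Str.startswith ep "epoch_" = true then
    match PySem.Str.split? ep "_" with
    | none => none                                   -- unreachable: separator "_" is nonempty
    | some parts =>
      match PySem.List.pyGet? parts 1 with
      | none => none                                 -- IndexError: passed
      | some s => PySem.Int.ofStr? s                 -- none = ValueError: passed
  else none

-- ===== PORT A =====
def get_default_epoch (epochs : List String) : Int :=
  if "final" ∈ epochs then
    ((PySem.List.index? epochs "final").getD 0 : Nat)
  else
    let epoch_nums := (PySem.List.enumerate epochs 0).foldl
      (fun acc p =>
        match pvEpochNum? p.2 with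
        | some num => acc ++ [(num, p.1)]
        | none => acc) []
    match PySem.List.max? epoch_nums (fun x => x.1) with
    | some m => m.2
    | none => 0

-- ===== PORT B =====
def pvStepB (s : Int × Option (Int × Int)) (p : Int × String) : Int × Option (Int × Int) :=
  let f := if s.1 < 0 ∧ p.2 = "final" then p.1 else s.1
  match pvEpochNum? p.2 with
  | none => (f, s.2)
  | some num =>
    match s.2 with
    | none => (f, some (num, p.1))
    | some b => if b.1 < num then (f, some (num, p.1)) else (f, b)

def get_default_epoch_alt (epochs : List String) : Int :=
  let r := (PySem.List.enumerate epochs 0).foldl pvStepB (-1, none)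
  if 0 ≤ r.1 then r.1
  else
    match r.2 with
    | some b => b.2
    | none => 0

-- ===== PRECONDITION & SPEC =====
def Spec_get_default_epoch (epochs : List String) (out : Int) : Prop := out = get_default_epoch_alt epochs
instance (epochs : List String) (out : Int) : Decidable (Spec_get_default_epoch epochs out) := by unfold Spec_get_default_epoch; infer_instance

-- ===== CLAIM (what is proved, stated in full; the proofs are below) =====
def Claim_equal_get_default_epoch : Prop := ∀ (epochs : List String), Dom_get_default_epoch epochs → Spec_get_default_epoch epochs (get_default_epoch epochs)

-- ===== LEMMAS AND PROOFS =====

-- the two components of B's state evolve independently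
def pvF (f : Int) (p : Int × String) : Int := if f < 0 ∧ p.2 = "final" then p.1 else f

def pvG (b : Option (Int × Int)) (p : Int × String) : Option (Int × Int) :=
  match pvEpochNum? p.2 with
  | none => b
  | some num =>
    match b with
    | none => some (num, p.1)
    | some bb => if bb.1 < num then some (num, p.1) else some bb

theorem foldl_stepB_split (ps : List (Int × String)) (f : Int) (b : Option (Int × Int)) :
    ps.foldl pvStepB (f, b) = (ps.foldl pvF f, ps.foldl pvG b) := by
  induction ps generalizing f b with
  | nil => rfl
  | cons p t ih =>
    simp only [List.foldl_cons]
    rw [show pvStepB (f, b) p = (pvF f p, pvG b p) from ?_, ih]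
    simp only [pvStepB, pvF, pvG]
    cases pvEpochNum? p.2 with
    | none => rfl
    | some num =>
      cases b with
      | none => rfl
      | some bb => dsimp only; split <;> rfl

theorem foldl_pvF_nonneg (ps : List (Int × String)) (f : Int) (hf : 0 ≤ f) :
    ps.foldl pvF f = f := by
  induction ps with
  | nil => rfl
  | cons p t ih =>
    simp only [List.foldl_cons, pvF]
    rw [if_neg (fun h => absurd h.1 (by omega))]
    exact ih

theorem foldl_pvF_index (epochs : List String) (s0 : Int) (hs : 0 ≤ s0) :
    (PySem.List.enumerate epochs s0).foldl pvF (-1)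
      = match PySem.List.index? epochs "final" with
        | some k => s0 + k
        | none => -1 := by
  induction epochs generalizing s0 with
  | nil => rfl
  | cons x t ih =>
    rw [PySem.List.enumerate_cons, List.foldl_cons]
    by_cases hx : x = "final"
    · subst hx
      rw [PySem.List.index?_cons_self]
      have h1 : pvF (-1) (s0, "final") = s0 := by simp [pvF]
      rw [h1, foldl_pvF_nonneg _ _ hs]
      simp
    · rw [PySem.List.index?_cons_of_ne t hx]
      have h1 : pvF (-1) (s0, x) = -1 := by simp [pvF, hx]
      rw [h1, ih (s0 + 1) (by omega)]
      cases PySem.List.index? t "final" with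
      | none => rfl
      | some k => simp only [Option.map_some]; push_cast; ring

-- A's collected list, as a filterMap of the enumerated pairs
def pvNums (ps : List (Int × String)) : List (Int × Int) :=
  ps.filterMap fun p => (pvEpochNum? p.2).map fun n => (n, p.1)

theorem foldl_stepA_eq (ps : List (Int × String)) (acc : List (Int × Int)) :
    ps.foldl (fun acc p =>
        match pvEpochNum? p.2 with
        | some num => acc ++ [(num, p.1)]
        | none => acc) acc = acc ++ pvNums ps := by
  induction ps generalizing acc with
  | nil => simp [pvNums]
  | cons p t ih =>
    simp only [List.foldl_cons, pvNums, List.filterMap_cons]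
    cases h : pvEpochNum? p.2 with
    | none => simpa [h, pvNums] using ih acc
    | some num => simpa [h, pvNums] using ih (acc ++ [(num, p.1)])

-- B's running best is Python's max(..., key=fst) of A's collected list
theorem foldl_pvG_eq (ps : List (Int × String)) (b : Option (Int × Int)) :
    ps.foldl pvG b = (pvNums ps).foldl
      (fun acc x =>
        match acc with
        | none => some x
        | some m => if m.1 < x.1 then some x else some m) b := by
  induction ps generalizing b with
  | nil => rfl
  | cons p t ih =>
    simp only [List.foldl_cons, pvNums, List.filterMap_cons]
    cases h : pvEpochNum? p.2 with
    | none => simpa [pvG, h, pvNums] using ih b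
    | some num =>
      rw [show pvG b p = (match b with
            | none => some (num, p.1)
            | some bb => if bb.1 < num then some (num, p.1) else some bb) from by
          simp [pvG, h]]
      cases b with
      | none => simpa [pvNums] using ih (some (num, p.1))
      | some bb =>
        by_cases hb : bb.1 < num
        · simpa [pvNums, hb] using ih (some (num, p.1))
        · simpa [pvNums, hb] using ih (some bb)

theorem pvMax?_eq (l : List (Int × Int)) :
    PySem.List.max? l (fun x => x.1) = l.foldl
      (fun acc x =>
        match acc with
        | none => some x
        | some m => if m.1 < x.1 then some x else some m) none := by
  simp only [PySem.List.max?]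
  refine PySem.List.foldl_congr_mem l _ _ _ (fun acc x _ => ?_)
  cases acc <;> rfl

-- ===== VERDICT (by name: the statement is the Claim_ definition above) =====
theorem get_default_epoch_spec : Claim_equal_get_default_epoch := by
  intro epochs _
  show get_default_epoch epochs = get_default_epoch_alt epochs
  unfold get_default_epoch get_default_epoch_alt
  rw [foldl_stepB_split, foldl_pvF_index epochs 0 le_rfl, foldl_pvG_eq]
  by_cases hmem : "final" ∈ epochs
  · rw [if_pos hmem]
    obtain ⟨k, hk⟩ : ∃ k, PySem.List.index? epochs "final" = some k :=
      Option.isSome_iff_exists.mp ((PySem.List.index?_isSome_iff epochs "final").mpr hmem)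
    rw [hk]
    simp
  · rw [if_neg hmem]
    have hk : PySem.List.index? epochs "final" = none :=
      (PySem.List.index?_eq_none_iff epochs "final").mpr hmem
    rw [hk]
    rw [foldl_stepA_eq]
    simp only [List.nil_append]
    rw [pvMax?_eq]
    norm_num
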